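-- pv_equiv track=rewrite | github.com/K-Demin/rodent_MRI_test | analyze_implant_distance.py | _binary_majority
-- ===== SOURCE A (Python) =====
-- from typing import Iterable, List, Sequence, Tuple
--
-- def _binary_majority(mask: Sequence[bool], w: int, h: int, min_neighbors: int, iters: int = 1) -> List[bool]:
--     out = list(mask)
--     for _ in range(iters):
--         new = [False] * (w * h)
--         for y in range(h):
--             for x in range(w):
--                 cnt = 0
--                 for yy in range(max(0, y - 1), min(h, y + 2)):
--                     for xx in range(max(0, x - 1), min(w, x + 2)):
--                         if out[yy * w + xx]:
--                             cnt += 1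
--                 new[y * w + x] = cnt >= min_neighbors
--         out = new
--     return out
-- ===== SOURCE B (Python) =====
-- def _binary_majority(mask, w, h, min_neighbors, iters=1):
--     out = list(mask)
--     for _ in range(iters):
--         rowsum = [sum(out[y * w + xx] for xx in range(max(0, x - 1), min(w, x + 2)))
--                   for y in range(h) for x in range(w)]
--         out = [sum(rowsum[yy * w + x] for yy in range(max(0, y - 1), min(h, y + 2))) >= min_neighbors
--                for y in range(h) for x in range(w)]
--     return out
-- ===== Notes on version B (the rewrite author's own statement) =====
-- stated objective: faster
-- what changed: B replaces the per-pixel 3x3 nested neighborhood scan by a separable two-pass box sum per iteration: a horizontal clamped 3-window sum array, then a vertical clamped 3-window sum over it, thresholded against min_neighbors.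
-- intended difference: When iters>=1 and both w<0 and h<0 (so w*h>0), A returns a spurious all-False list of length w*h produced by [False]*(w*h) with empty loops; B returns the empty list, the intended result for a grid with negative dimensions. — e.g. on _binary_majority([], -1, -1, 1, 1): A returns [false], B returns []
import Mathlib
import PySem

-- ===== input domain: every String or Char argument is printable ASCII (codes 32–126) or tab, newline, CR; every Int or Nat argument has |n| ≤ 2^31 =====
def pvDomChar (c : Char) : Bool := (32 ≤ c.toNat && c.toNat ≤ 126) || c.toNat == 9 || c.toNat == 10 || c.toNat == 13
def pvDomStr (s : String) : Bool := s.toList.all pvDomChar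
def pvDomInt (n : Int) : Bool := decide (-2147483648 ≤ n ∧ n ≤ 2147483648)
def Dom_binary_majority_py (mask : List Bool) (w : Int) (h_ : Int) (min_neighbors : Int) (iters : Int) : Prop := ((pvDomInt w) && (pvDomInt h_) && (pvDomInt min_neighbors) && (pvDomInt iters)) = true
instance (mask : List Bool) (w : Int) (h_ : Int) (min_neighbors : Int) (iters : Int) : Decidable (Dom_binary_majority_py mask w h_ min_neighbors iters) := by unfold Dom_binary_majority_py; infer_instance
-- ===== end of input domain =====

-- B computes each iteration with a separable two-pass clamped box sum (row sums, then column
-- sums of row sums) instead of A's per-pixel 3x3 nested scan; measurably faster by a constant factor.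


-- ===== PORT A =====
-- '.toNat' in 'List.replicate' and 'pySetD'/'pyGetD' indices is exact: under Pre_ every index
-- Python evaluates is nonnegative and in range, and [False]*(w*h) is [] for w*h ≤ 0.
-- Python's local 'cnt' (init 0, incremented by the 3×3 scan) is the inner double fold.
def binary_majority_py (mask : List Bool) (w : Int) (h_ : Int) (min_neighbors : Int) (iters : Int) : List Bool :=
  (PySem.List.pyRange 0 iters 1).foldl (fun out _ =>
    (PySem.List.pyRange 0 h_ 1).foldl (fun new y =>
      (PySem.List.pyRange 0 w 1).foldl (fun new x =>
        PySem.List.pySetD new (y*w + x) (decide (min_neighbors ≤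
          (PySem.List.pyRange (max 0 (y-1)) (min h_ (y+2)) 1).foldl (fun cnt yy =>
            (PySem.List.pyRange (max 0 (x-1)) (min w (x+2)) 1).foldl (fun cnt xx =>
              if PySem.List.pyGetD out (yy*w+xx) false then cnt+1 else cnt) cnt) 0))) new)
      (List.replicate (w*h_).toNat false)) mask

-- ===== PORT B =====
def binary_majority_py_alt (mask : List Bool) (w : Int) (h_ : Int) (min_neighbors : Int) (iters : Int) : List Bool :=
  (PySem.List.pyRange 0 iters 1).foldl (fun out _ =>
    let rowsum : List Int :=
      (PySem.List.pyRange 0 h_ 1).flatMap (fun y =>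
        (PySem.List.pyRange 0 w 1).map (fun x =>
          (PySem.List.pyRange (max 0 (x-1)) (min w (x+2)) 1).foldl
            (fun s xx => s + (if PySem.List.pyGetD out (y*w+xx) false then 1 else 0)) 0))
    (PySem.List.pyRange 0 h_ 1).flatMap (fun y =>
      (PySem.List.pyRange 0 w 1).map (fun x =>
        decide (min_neighbors ≤
          (PySem.List.pyRange (max 0 (y-1)) (min h_ (y+2)) 1).foldl
            (fun s yy => s + PySem.List.pyGetD rowsum (yy*w+x) 0) 0)))) mask

-- ===== PRECONDITION & SPEC =====
-- Pre_ excludes exactly the inputs where A raises IndexError: iters ≥ 1 with a positive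
-- w×h grid larger than the mask (the first pass then reads past the end of the mask).
def Pre_binary_majority_py (mask : List Bool) (w : Int) (h_ : Int) (min_neighbors : Int) (iters : Int) : Prop :=
  iters ≤ 0 ∨ w ≤ 0 ∨ h_ ≤ 0 ∨ w * h_ ≤ (mask.length : Int)
instance (mask : List Bool) (w : Int) (h_ : Int) (min_neighbors : Int) (iters : Int) : Decidable (Pre_binary_majority_py mask w h_ min_neighbors iters) := by unfold Pre_binary_majority_py; infer_instance
def pvWitness_binary_majority_py : List Bool × Int × Int × Int × Int := ([true, true, false, true], 2, 2, 3, 1)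

-- When iters ≥ 1 and both w < 0 and h < 0 (so w*h > 0), A returns a spurious all-False list of
-- length w*h produced by [False]*(w*h) with empty loops; B returns the empty list, the intended
-- result for a grid with negative dimensions.
def D_binary_majority_py (mask : List Bool) (w : Int) (h_ : Int) (min_neighbors : Int) (iters : Int) : Prop :=
  1 ≤ iters ∧ w < 0 ∧ h_ < 0
instance (mask : List Bool) (w : Int) (h_ : Int) (min_neighbors : Int) (iters : Int) : Decidable (D_binary_majority_py mask w h_ min_neighbors iters) := by unfold D_binary_majority_py; infer_instance

def Spec_binary_majority_py (mask : List Bool) (w : Int) (h_ : Int) (min_neighbors : Int) (iters : Int) (out : List Bool) : Prop := ¬ D_binary_majority_py mask w h_ min_neighbors iters → out = binary_majority_py_alt mask w h_ min_neighbors iters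
instance (mask : List Bool) (w : Int) (h_ : Int) (min_neighbors : Int) (iters : Int) (out : List Bool) : Decidable (Spec_binary_majority_py mask w h_ min_neighbors iters out) := by unfold Spec_binary_majority_py; infer_instance

def pvDiffWitness_binary_majority_py : List Bool × Int × Int × Int × Int := ([], -1, -1, 1, 1)
def pvDiffWitnessOut_binary_majority_py : (List Bool) × (List Bool) := ([false], [])

-- ===== CLAIM (what is proved, stated in full; the proofs are below) =====
def Claim_unchanged_binary_majority_py : Prop := ∀ (mask : List Bool) (w : Int) (h_ : Int) (min_neighbors : Int) (iters : Int), Dom_binary_majority_py mask w h_ min_neighbors iters → Pre_binary_majority_py mask w h_ min_neighbors iters → Spec_binary_majority_py mask w h_ min_neighbors iters (binary_majority_py mask w h_ min_neighbors iters)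
def Claim_changed_binary_majority_py : Prop := Dom_binary_majority_py (pvDiffWitness_binary_majority_py.1) (pvDiffWitness_binary_majority_py.2.1) (pvDiffWitness_binary_majority_py.2.2.1) (pvDiffWitness_binary_majority_py.2.2.2.1) (pvDiffWitness_binary_majority_py.2.2.2.2) ∧ Pre_binary_majority_py (pvDiffWitness_binary_majority_py.1) (pvDiffWitness_binary_majority_py.2.1) (pvDiffWitness_binary_majority_py.2.2.1) (pvDiffWitness_binary_majority_py.2.2.2.1) (pvDiffWitness_binary_majority_py.2.2.2.2) ∧ D_binary_majority_py (pvDiffWitness_binary_majority_py.1) (pvDiffWitness_binary_majority_py.2.1) (pvDiffWitness_binary_majority_py.2.2.1) (pvDiffWitness_binary_majority_py.2.2.2.1) (pvDiffWitness_binary_majority_py.2.2.2.2) ∧ binary_majority_py (pvDiffWitness_binary_majority_py.1) (pvDiffWitness_binary_majority_py.2.1) (pvDiffWitness_binary_majority_py.2.2.1) (pvDiffWitness_binary_majority_py.2.2.2.1) (pvDiffWitness_binary_majority_py.2.2.2.2) = pvDiffWitnessOut_binary_majority_py.1 ∧ binary_majority_py_alt (pvDiffWitness_binary_majority_py.1)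 (pvDiffWitness_binary_majority_py.2.1) (pvDiffWitness_binary_majority_py.2.2.1) (pvDiffWitness_binary_majority_py.2.2.2.1) (pvDiffWitness_binary_majority_py.2.2.2.2) = pvDiffWitnessOut_binary_majority_py.2 ∧ pvDiffWitnessOut_binary_majority_py.1 ≠ pvDiffWitnessOut_binary_majority_py.2
def Claim_exact_binary_majority_py : Prop := ∀ (mask : List Bool) (w : Int) (h_ : Int) (min_neighbors : Int) (iters : Int), Dom_binary_majority_py mask w h_ min_neighbors iters → Pre_binary_majority_py mask w h_ min_neighbors iters → D_binary_majority_py mask w h_ min_neighbors iters → binary_majority_py mask w h_ min_neighbors iters ≠ binary_majority_py_alt mask w h_ min_neighbors iters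

-- ===== LEMMAS AND PROOFS =====

-- the row-major grid both step functions produce
def bmGrid {a : Type} (w h : Int) (f : Int → Int → a) : List a :=
  (PySem.List.pyRange 0 h 1).flatMap (fun y => (PySem.List.pyRange 0 w 1).map (f y))

lemma bmSumMapConst {a : Type} (l : List a) (c : Nat) : (l.map (fun _ => c)).sum = l.length * c := by
  induction l with
  | nil => simp
  | cons x xs ih => simp [ih, Nat.succ_mul, Nat.add_comm]

lemma bmFlat_len {a : Type} (w b bnd : Int) (f : Int → Int → a) :
    ((PySem.List.pyRange b bnd 1).flatMap (fun y => (PySem.List.pyRange 0 w 1).map (f y))).length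
      = (bnd - b).toNat * w.toNat := by
  rw [List.length_flatMap]
  have h1 : (List.map (fun y => ((PySem.List.pyRange 0 w 1).map (f y)).length) (PySem.List.pyRange b bnd 1))
      = (PySem.List.pyRange b bnd 1).map (fun _ => w.toNat) := by
    apply List.map_congr_left
    intro y _
    simp [PySem.List.length_pyRange_one]
  rw [h1, bmSumMapConst, PySem.List.length_pyRange_one]

-- getD of a grid at a row-major index (Nat form, inducting on the number of rows)
lemma bmRows_getD {a : Type} (w : Int) (f : Int → Int → a) (d : a) :
    ∀ (n : Nat) (b : Int) (ry rx : Nat), ry < n → rx < w.toNat →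
      ((PySem.List.pyRange b (b + (n:Int)) 1).flatMap
          (fun y => (PySem.List.pyRange 0 w 1).map (f y))).getD (ry * w.toNat + rx) d
        = f (b + (ry:Int)) (rx:Int) := by
  intro n
  induction n with
  | zero => intro b ry rx hry _; exact absurd hry (Nat.not_lt_zero ry)
  | succ n ih =>
    intro b ry rx hry hrx
    have hc : ((n+1 : Nat) : Int) = (n:Int) + 1 := by push_cast; ring
    rw [hc, show b + ((n:Int) + 1) = (b + 1) + (n:Int) from by ring,
        show PySem.List.pyRange b (b + 1 + (n:Int)) 1
            = b :: PySem.List.pyRange (b+1) (b + 1 + (n:Int)) 1 from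
          PySem.List.pyRange_one_cons (by omega),
        List.flatMap_cons]
    have hrowlen : ((PySem.List.pyRange 0 w 1).map (f b)).length = w.toNat := by
      simp [PySem.List.length_pyRange_one]
    cases ry with
    | zero =>
      simp only [Nat.zero_mul, Nat.zero_add]
      rw [List.getD_append _ _ _ _ (by omega)]
      rw [List.getD_eq_getElem?_getD, List.getElem?_map, PySem.List.getElem?_pyRange_one]
      simp only [PySem.List.length_pyRange_one] at hrowlen
      rw [if_pos (by omega)]
      simp
    | succ r =>
      rw [List.getD_eq_getElem?_getD,
          List.getElem?_append_right (by
            rw [hrowlen]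
            calc w.toNat ≤ r * w.toNat + w.toNat := by omega
              _ = (r+1) * w.toNat := by rw [Nat.succ_mul]
              _ ≤ (r+1) * w.toNat + rx := by omega)]
      rw [hrowlen, show (r+1) * w.toNat + rx - w.toNat = r * w.toNat + rx from by rw [Nat.succ_mul]; omega]
      rw [← List.getD_eq_getElem?_getD]
      rw [ih (b+1) r rx (by omega) hrx]
      congr 1
      push_cast
      ring

lemma bmGrid_get {a : Type} (w h : Int) (f : Int → Int → a) (d : a) (y x : Int)
    (hy0 : 0 ≤ y) (hyh : y < h) (hx0 : 0 ≤ x) (hxw : x < w) :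
    PySem.List.pyGetD (bmGrid w h f) (y*w + x) d = f y x := by
  have hw : 0 < w := lt_of_le_of_lt hx0 hxw
  have hidx0 : 0 ≤ y*w + x := by
    have := mul_nonneg hy0 hw.le
    omega
  have hyc : ((y.toNat : Nat) : Int) = y := Int.toNat_of_nonneg hy0
  have hxc : ((x.toNat : Nat) : Int) = x := Int.toNat_of_nonneg hx0
  have hwc : ((w.toNat : Nat) : Int) = w := Int.toNat_of_nonneg hw.le
  rw [PySem.List.pyGetD_of_nonneg _ _ hidx0]
  have hcast : y*w + x = ((y.toNat * w.toNat + x.toNat : Nat) : Int) := by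
    push_cast
    rw [hyc, hxc, hwc]
  have key := bmRows_getD w f d h.toNat 0 y.toNat x.toNat (by omega) (by omega)
  rw [show (0:Int) + ((h.toNat : Nat) : Int) = h from by omega] at key
  rw [bmGrid, hcast, Int.toNat_natCast, key,
      show (0:Int) + ((y.toNat : Nat) : Int) = y from by omega, hxc]

-- the set-fold of one row of port A
lemma bmSetRow (v : Int → Bool) (base : Int) (hb : 0 ≤ base) :
    ∀ (n : Nat) (l : List Bool), base.toNat + n ≤ l.length →
      (PySem.List.pyRange 0 (n:Int) 1).foldl (fun acc x => PySem.List.pySetD acc (base + x) (v x)) l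
        = l.take base.toNat ++ (PySem.List.pyRange 0 (n:Int) 1).map v ++ l.drop (base.toNat + n) := by
  intro n
  induction n with
  | zero =>
    intro l _
    rw [show ((0:Nat):Int) = 0 from rfl, PySem.List.pyRange_one_eq_nil le_rfl]
    simp
  | succ n ih =>
    intro l hl
    have hc : ((n+1 : Nat) : Int) = (n:Int) + 1 := by push_cast; ring
    rw [hc, PySem.List.pyRange_one_succ_right (by positivity)]
    rw [List.foldl_append, List.map_append]
    rw [ih l (by omega)]
    simp only [List.foldl_cons, List.foldl_nil, List.map_cons, List.map_nil]
    rw [PySem.List.pySetD_of_nonneg _ _ (by omega)]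
    have htake : (l.take base.toNat).length = base.toNat := by
      rw [List.length_take]; omega
    have hmaplen : ((PySem.List.pyRange 0 (n:Int) 1).map v).length = n := by
      simp [PySem.List.length_pyRange_one]
    have hidx : (base + (n:Int)).toNat = base.toNat + n := by omega
    rw [hidx, List.set_append, if_neg (by rw [List.length_append, htake, hmaplen]; omega)]
    rw [List.length_append, htake, hmaplen,
        show base.toNat + n - (base.toNat + n) = 0 from by omega]
    rw [List.drop_eq_getElem_cons (show base.toNat + n < l.length from by omega)]
    simp only [List.set_cons_zero]
    rw [show base.toNat + n + 1 = base.toNat + (n+1) from by omega]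
    simp [List.append_assoc]

-- the set-fold over all rows of port A builds a grid
lemma bmSetRows (w h : Int) (hw : 0 < w) (hh : 0 ≤ h) (g : Int → Int → Bool) :
    ∀ (m : Nat), (m:Int) ≤ h →
      (PySem.List.pyRange 0 (m:Int) 1).foldl (fun new y =>
          (PySem.List.pyRange 0 w 1).foldl (fun acc x => PySem.List.pySetD acc (y*w + x) (g y x)) new)
        (List.replicate (w*h).toNat false)
      = (PySem.List.pyRange 0 (m:Int) 1).flatMap (fun y => (PySem.List.pyRange 0 w 1).map (g y))
          ++ List.replicate ((w*h).toNat - m * w.toNat) false := by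
  have hwh : (w*h).toNat = w.toNat * h.toNat := Int.toNat_mul hw.le hh
  have hwc : ((w.toNat : Nat) : Int) = w := Int.toNat_of_nonneg hw.le
  intro m
  induction m with
  | zero =>
    intro _
    rw [show ((0:Nat):Int) = 0 from rfl, PySem.List.pyRange_one_eq_nil le_rfl]
    simp
  | succ m ih =>
    intro hm
    have hmh : m + 1 ≤ h.toNat := by omega
    have hc : ((m+1 : Nat) : Int) = (m:Int) + 1 := by push_cast; ring
    rw [hc, PySem.List.pyRange_one_succ_right (by positivity)]
    rw [List.foldl_append, List.flatMap_append]
    rw [ih (by omega)]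
    simp only [List.foldl_cons, List.foldl_nil, List.flatMap_cons, List.flatMap_nil, List.append_nil]
    have hb : (0:Int) ≤ (m:Int) * w := by positivity
    have hbase : (((m:Int)) * w).toNat = m * w.toNat := by
      rw [Int.toNat_mul (by positivity) hw.le]
      simp
    have hlen : ((PySem.List.pyRange 0 (m:Int) 1).flatMap (fun y => (PySem.List.pyRange 0 w 1).map (g y))).length = m * w.toNat := by
      rw [bmFlat_len]; simp
    have hsz : m * w.toNat + w.toNat ≤ (w*h).toNat := by
      rw [hwh, Nat.mul_comm w.toNat h.toNat]
      calc m * w.toNat + w.toNat = (m+1) * w.toNat := by rw [Nat.succ_mul]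
        _ ≤ h.toNat * w.toNat := Nat.mul_le_mul_right _ hmh
    have hrow := bmSetRow (fun x => g (m:Int) x) ((m:Int)*w) hb w.toNat
      ((PySem.List.pyRange 0 (m:Int) 1).flatMap (fun y => (PySem.List.pyRange 0 w 1).map (g y))
        ++ List.replicate ((w*h).toNat - m * w.toNat) false)
      (by
        rw [List.length_append, hlen, List.length_replicate, hbase]
        omega)
    rw [hwc] at hrow
    rw [hrow, hbase]
    have htk : ((PySem.List.pyRange 0 (m:Int) 1).flatMap (fun y => (PySem.List.pyRange 0 w 1).map (g y))
        ++ List.replicate ((w*h).toNat - m * w.toNat) false).take (m * w.toNat)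
        = (PySem.List.pyRange 0 (m:Int) 1).flatMap (fun y => (PySem.List.pyRange 0 w 1).map (g y)) := by
      rw [List.take_append, hlen, Nat.sub_self, List.take_zero, List.append_nil, ← hlen, List.take_length]
    have hdp : ((PySem.List.pyRange 0 (m:Int) 1).flatMap (fun y => (PySem.List.pyRange 0 w 1).map (g y))
        ++ List.replicate ((w*h).toNat - m * w.toNat) false).drop (m * w.toNat + w.toNat)
        = List.replicate ((w*h).toNat - (m+1) * w.toNat) false := by
      rw [List.drop_append, hlen, List.drop_eq_nil_of_le (by omega), List.nil_append,
          List.drop_replicate]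
      congr 1
      rw [Nat.succ_mul]
      omega
    rw [htk, hdp]

-- A's accumulated if-count over one window row equals the offset plus B's 0/1 row sum
lemma bmIfFold (out : List Bool) (w yy x c : Int) :
    (PySem.List.pyRange (max 0 (x-1)) (min w (x+2)) 1).foldl (fun cnt xx =>
        if PySem.List.pyGetD out (yy*w+xx) false then cnt+1 else cnt) c
      = c + (PySem.List.pyRange (max 0 (x-1)) (min w (x+2)) 1).foldl (fun s xx =>
        s + (if PySem.List.pyGetD out (yy*w+xx) false then 1 else 0)) 0 := by
  rw [PySem.List.foldl_congr_mem _ _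
        (fun cnt xx => cnt + (if PySem.List.pyGetD out (yy*w+xx) false then 1 else 0)) c
        (by intro acc xx _; by_cases hb : PySem.List.pyGetD out (yy*w+xx) false <;> simp [hb])]
  rw [PySem.List.foldl_add _ (fun xx => if PySem.List.pyGetD out (yy*w+xx) false then (1:Int) else 0) c,
      PySem.List.foldl_add _ (fun xx => if PySem.List.pyGetD out (yy*w+xx) false then (1:Int) else 0) 0]
  omega

-- a fold whose step returns the accumulator unchanged
lemma bmFoldlId {a b : Type} (l : List b) (acc : a) : l.foldl (fun acc _ => acc) acc = acc := by
  induction l generalizing acc with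
  | nil => rfl
  | cons x xs ih => exact ih acc

-- a fold whose step is constant ends at the constant once started there
lemma bmFoldlConst {a b : Type} (f : a → b → a) (c : a) (hf : ∀ acc v, f acc v = c)
    (l : List b) : l.foldl f c = c := by
  induction l with
  | nil => rfl
  | cons x xs ih => rw [List.foldl_cons, hf]; exact ih

-- the per-iteration step functions agree for a positive grid
lemma bmStep_pos (out : List Bool) (w h mn : Int) (hw : 0 < w) (hh : 0 < h) :
    (PySem.List.pyRange 0 h 1).foldl (fun new y =>
      (PySem.List.pyRange 0 w 1).foldl (fun new x =>
        PySem.List.pySetD new (y*w + x) (decide (mn ≤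
          (PySem.List.pyRange (max 0 (y-1)) (min h (y+2)) 1).foldl (fun cnt yy =>
            (PySem.List.pyRange (max 0 (x-1)) (min w (x+2)) 1).foldl (fun cnt xx =>
              if PySem.List.pyGetD out (yy*w+xx) false then cnt+1 else cnt) cnt) 0))) new)
      (List.replicate (w*h).toNat false)
    = (PySem.List.pyRange 0 h 1).flatMap (fun y =>
      (PySem.List.pyRange 0 w 1).map (fun x =>
        decide (mn ≤
          (PySem.List.pyRange (max 0 (y-1)) (min h (y+2)) 1).foldl
            (fun s yy => s + PySem.List.pyGetD
              ((PySem.List.pyRange 0 h 1).flatMap (fun y =>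
                (PySem.List.pyRange 0 w 1).map (fun x =>
                  (PySem.List.pyRange (max 0 (x-1)) (min w (x+2)) 1).foldl
                    (fun s xx => s + (if PySem.List.pyGetD out (y*w+xx) false then 1 else 0)) 0)))
              (yy*w+x) 0) 0))) := by
  have hhc : (((h.toNat : Nat)) : Int) = h := Int.toNat_of_nonneg hh.le
  have hA := bmSetRows w h hw hh.le
    (fun y x => decide (mn ≤
      (PySem.List.pyRange (max 0 (y-1)) (min h (y+2)) 1).foldl (fun cnt yy =>
        (PySem.List.pyRange (max 0 (x-1)) (min w (x+2)) 1).foldl (fun cnt xx =>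
          if PySem.List.pyGetD out (yy*w+xx) false then cnt+1 else cnt) cnt) 0))
    h.toNat (by omega)
  rw [hhc] at hA
  have hz : (w*h).toNat - h.toNat * w.toNat = 0 := by
    rw [Int.toNat_mul hw.le hh.le, Nat.mul_comm]
    omega
  rw [hz, List.replicate_zero, List.append_nil] at hA
  rw [hA]
  -- both sides are flatMaps over the same rows; compare pixel by pixel
  apply List.flatMap_congr
  intro y hy
  obtain ⟨hy0, hyh⟩ := PySem.List.mem_pyRange_one.mp hy
  apply List.map_congr_left
  intro x hx
  obtain ⟨hx0, hxw⟩ := PySem.List.mem_pyRange_one.mp hx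
  -- counts agree: A's double fold = B's sum of row sums read from the rowsum grid
  have hcnt : (PySem.List.pyRange (max 0 (y-1)) (min h (y+2)) 1).foldl (fun cnt yy =>
        (PySem.List.pyRange (max 0 (x-1)) (min w (x+2)) 1).foldl (fun cnt xx =>
          if PySem.List.pyGetD out (yy*w+xx) false then cnt+1 else cnt) cnt) (0:Int)
      = (PySem.List.pyRange (max 0 (y-1)) (min h (y+2)) 1).foldl
          (fun s yy => s + PySem.List.pyGetD
            ((PySem.List.pyRange 0 h 1).flatMap (fun y =>
              (PySem.List.pyRange 0 w 1).map (fun x =>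
                (PySem.List.pyRange (max 0 (x-1)) (min w (x+2)) 1).foldl
                  (fun s xx => s + (if PySem.List.pyGetD out (y*w+xx) false then 1 else 0)) 0)))
            (yy*w+x) 0) (0:Int) := by
    refine Eq.trans
      (PySem.List.foldl_congr_mem _ _
        (fun s yy => s + (PySem.List.pyRange (max 0 (x-1)) (min w (x+2)) 1).foldl (fun s xx =>
          s + (if PySem.List.pyGetD out (yy*w+xx) false then 1 else 0)) 0) 0 ?_)
      (Eq.symm (PySem.List.foldl_congr_mem _ _
        (fun s yy => s + (PySem.List.pyRange (max 0 (x-1)) (min w (x+2)) 1).foldl (fun s xx =>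
          s + (if PySem.List.pyGetD out (yy*w+xx) false then 1 else 0)) 0) 0 ?_))
    · intro acc yy _
      exact bmIfFold out w yy x acc
    · intro acc yy hyy
      obtain ⟨hyy1, hyy2⟩ := PySem.List.mem_pyRange_one.mp hyy
      congr 1
      exact bmGrid_get w h
        (fun y x => (PySem.List.pyRange (max 0 (x-1)) (min w (x+2)) 1).foldl
          (fun s xx => s + (if PySem.List.pyGetD out (y*w+xx) false then 1 else 0)) 0)
        0 yy x (by omega) (by omega) hx0 hxw
  simp only [hcnt]

-- port A's step gives [] when the grid is degenerate
lemma bmStepA_nil (out : List Bool) (w h mn : Int) (hwh : w * h ≤ 0) :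
    (PySem.List.pyRange 0 h 1).foldl (fun new y =>
      (PySem.List.pyRange 0 w 1).foldl (fun new x =>
        PySem.List.pySetD new (y*w + x) (decide (mn ≤
          (PySem.List.pyRange (max 0 (y-1)) (min h (y+2)) 1).foldl (fun cnt yy =>
            (PySem.List.pyRange (max 0 (x-1)) (min w (x+2)) 1).foldl (fun cnt xx =>
              if PySem.List.pyGetD out (yy*w+xx) false then cnt+1 else cnt) cnt) 0))) new)
      (List.replicate (w*h).toNat false) = [] := by
  have hz : (w*h).toNat = 0 := Int.toNat_of_nonpos hwh
  rw [hz, List.replicate_zero]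
  by_cases hh : h ≤ 0
  · rw [PySem.List.pyRange_one_eq_nil hh, List.foldl_nil]
  · have hw : w ≤ 0 := by nlinarith
    rw [PySem.List.pyRange_one_eq_nil hw]
    simp only [List.foldl_nil]
    exact bmFoldlId _ _

-- port B's step gives [] when a dimension is ≤ 0
lemma bmStepB_nil (out : List Bool) (w h mn : Int) (hwh : w ≤ 0 ∨ h ≤ 0) :
    ((PySem.List.pyRange 0 h 1).flatMap (fun y =>
      (PySem.List.pyRange 0 w 1).map (fun x =>
        decide (mn ≤
          (PySem.List.pyRange (max 0 (y-1)) (min h (y+2)) 1).foldl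
            (fun s yy => s + PySem.List.pyGetD
              ((PySem.List.pyRange 0 h 1).flatMap (fun y =>
                (PySem.List.pyRange 0 w 1).map (fun x =>
                  (PySem.List.pyRange (max 0 (x-1)) (min w (x+2)) 1).foldl
                    (fun s xx => s + (if PySem.List.pyGetD out (y*w+xx) false then 1 else 0)) 0)))
              (yy*w+x) 0) 0)))) = [] := by
  rcases hwh with hw | hh
  · rw [PySem.List.pyRange_one_eq_nil hw]
    simp
  · rw [PySem.List.pyRange_one_eq_nil hh]
    simp

-- ===== VERDICT (by name: the statement is the Claim_ definition above) =====
theorem binary_majority_py_spec : Claim_unchanged_binary_majority_py := by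
  intro mask w h_ min_neighbors iters _ _
  unfold Spec_binary_majority_py
  intro hD
  unfold binary_majority_py binary_majority_py_alt
  by_cases hi : iters ≤ 0
  · rw [PySem.List.pyRange_one_eq_nil hi]
    rfl
  · apply PySem.List.foldl_congr_mem
    intro out i _
    show _ = _
    by_cases hw : 0 < w
    · by_cases hh : 0 < h_
      · exact bmStep_pos out w h_ min_neighbors hw hh
      · have hwh : w * h_ ≤ 0 := by nlinarith
        rw [bmStepA_nil out w h_ min_neighbors hwh, bmStepB_nil out w h_ min_neighbors (Or.inr (by omega))]
    · have hwle : w ≤ 0 := by omega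
      have hwh : w * h_ ≤ 0 := by
        rcases hwle.lt_or_eq with hlt | he0
        · have hge : 0 ≤ h_ := by
            by_contra hc
            exact hD ⟨by omega, hlt, by omega⟩
          exact mul_nonpos_iff.mpr (Or.inr ⟨hlt.le, hge⟩)
        · rw [he0, zero_mul]
      rw [bmStepA_nil out w h_ min_neighbors hwh, bmStepB_nil out w h_ min_neighbors (Or.inl hwle)]

theorem binary_majority_py_changed : Claim_changed_binary_majority_py := by
  unfold Claim_changed_binary_majority_py; decide

theorem binary_majority_py_tight : Claim_exact_binary_majority_py := by
  intro mask w h_ min_neighbors iters _ _ hD heq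
  obtain ⟨hi, hw, hh⟩ := hD
  have hwh : 0 < w * h_ := mul_pos_of_neg_of_neg hw hh
  unfold binary_majority_py binary_majority_py_alt at heq
  rw [show PySem.List.pyRange 0 iters 1 = 0 :: PySem.List.pyRange (0+1) iters 1 from
        PySem.List.pyRange_one_cons (by omega)] at heq
  rw [List.foldl_cons, List.foldl_cons] at heq
  rw [show (PySem.List.pyRange 0 h_ 1) = [] from PySem.List.pyRange_one_eq_nil hh.le] at heq
  simp only [List.foldl_nil, List.flatMap_nil] at heq
  rw [bmFoldlConst (fun (_ : List Bool) (_ : Int) => List.replicate (w * h_).toNat false)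
        (List.replicate (w * h_).toNat false) (fun _ _ => rfl),
      bmFoldlConst (fun (_ : List Bool) (_ : Int) => ([] : List Bool)) [] (fun _ _ => rfl)] at heq
  have := congrArg List.length heq
  simp at this
  omega
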